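-- pv_equiv track=rewrite | github.com/gta191977649/eagl-godot | map_tools_ps2/src/map_tools_ps2/primitive_stream.py | segments_from_adc_disabled
-- ===== SOURCE A (Python) =====
-- GS_PRIM_TRIANGLE_STRIP = 4
--
-- def segments_from_adc_disabled(prim_type: int | None, adc_disabled: tuple[bool, ...]) -> tuple[tuple[int, int], ...]:
--     count = len(adc_disabled)
--     if prim_type != GS_PRIM_TRIANGLE_STRIP or count < 3:
--         return ((0, count),)
--
--     starts = [0]
--     for index in range(1, count - 1):
--         if adc_disabled[index] and adc_disabled[index + 1]:
--             starts.append(index)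
--     starts = sorted(set(starts))
--
--     segments: list[tuple[int, int]] = []
--     for segment_index, start in enumerate(starts):
--         end = starts[segment_index + 1] if segment_index + 1 < len(starts) else count
--         if end - start >= 3:
--             segments.append((start, end))
--     return tuple(segments) if segments else ((0, count),)
-- ===== SOURCE B (Python) =====
-- GS_PRIM_TRIANGLE_STRIP = 4
--
-- def segments_from_adc_disabled(prim_type, adc_disabled):
--     count = len(adc_disabled)
--     if prim_type != GS_PRIM_TRIANGLE_STRIP or count < 3:
--         return ((0, count),)
--
--     segments = []
--     current_start = 0
--     for index in range(1, count - 1):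
--         if adc_disabled[index] and adc_disabled[index + 1]:
--             if index - current_start >= 3:
--                 segments.append((current_start, index))
--             current_start = index
--     if count - current_start >= 3:
--         segments.append((current_start, count))
--     return tuple(segments) if segments else ((0, count),)
-- ===== Notes on version B (the rewrite author's own statement) =====
-- stated objective: simpler
-- what changed: B fuses A's three passes (collect boundary starts, sorted(set(...)), then pair consecutive starts with index lookups) into one scan that keeps a running current_start and emits each segment at the moment its end boundary is seen.
import Mathlib
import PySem

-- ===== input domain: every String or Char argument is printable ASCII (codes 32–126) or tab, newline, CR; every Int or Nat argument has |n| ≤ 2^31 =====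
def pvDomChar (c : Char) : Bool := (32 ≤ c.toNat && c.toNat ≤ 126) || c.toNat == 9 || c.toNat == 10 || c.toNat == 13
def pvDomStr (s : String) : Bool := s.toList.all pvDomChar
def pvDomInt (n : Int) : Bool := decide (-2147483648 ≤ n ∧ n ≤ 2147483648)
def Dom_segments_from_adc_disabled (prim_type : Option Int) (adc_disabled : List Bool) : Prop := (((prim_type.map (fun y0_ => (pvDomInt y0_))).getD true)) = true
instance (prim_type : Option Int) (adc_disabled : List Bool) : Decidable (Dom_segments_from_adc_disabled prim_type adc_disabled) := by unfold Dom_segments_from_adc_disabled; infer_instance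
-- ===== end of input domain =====

-- B replaces A's three passes (collect boundary starts, sorted(set(...)), pair consecutive
-- starts by index lookup) with a single scan carrying a running current_start; same result.

-- ===== PORT A =====
def segments_from_adc_disabled (prim_type : Option Int) (adc_disabled : List Bool) : List (Int × Int) :=
  let count : Int := adc_disabled.length
  if prim_type ≠ some 4 ∨ count < 3 then [(0, count)]
  else
    -- starts = [0]; for index in range(1, count-1): if adc[index] and adc[index+1]: starts.append(index)
    let starts0 : List Int := (PySem.List.pyRange 1 (count - 1) 1).foldl
      (fun acc index =>
        if PySem.List.pyGetD adc_disabled index false && PySem.List.pyGetD adc_disabled (index + 1) false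
        then acc ++ [index] else acc) [0]
    -- starts = sorted(set(starts))
    let starts : List Int := PySem.List.sorted (PySem.Set.ofList starts0) (fun x => x) false
    -- for segment_index, start in enumerate(starts): …
    let segments : List (Int × Int) := (PySem.List.enumerate starts 0).foldl
      (fun segs p =>
        if (if p.1 + 1 < (starts.length : Int) then PySem.List.pyGetD starts (p.1 + 1) 0 else count) - p.2 ≥ 3
        then segs ++ [(p.2, (if p.1 + 1 < (starts.length : Int) then PySem.List.pyGetD starts (p.1 + 1) 0 else count))]
        else segs) []
    if segments ≠ [] then segments else [(0, count)]

-- ===== PORT B =====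
def segments_from_adc_disabled_alt (prim_type : Option Int) (adc_disabled : List Bool) : List (Int × Int) :=
  let count : Int := adc_disabled.length
  if prim_type ≠ some 4 ∨ count < 3 then [(0, count)]
  else
    -- one scan: state = (current_start, segments)
    let st : Int × List (Int × Int) := (PySem.List.pyRange 1 (count - 1) 1).foldl
      (fun st index =>
        if PySem.List.pyGetD adc_disabled index false && PySem.List.pyGetD adc_disabled (index + 1) false
        then (index, if index - st.1 ≥ 3 then st.2 ++ [(st.1, index)] else st.2)
        else st) ((0 : Int), ([] : List (Int × Int)))
    let segments : List (Int × Int) := if count - st.1 ≥ 3 then st.2 ++ [(st.1, count)] else st.2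
    if segments ≠ [] then segments else [(0, count)]

-- ===== PRECONDITION & SPEC =====
def Spec_segments_from_adc_disabled (prim_type : Option Int) (adc_disabled : List Bool) (out : List (Int × Int)) : Prop := out = segments_from_adc_disabled_alt prim_type adc_disabled
instance (prim_type : Option Int) (adc_disabled : List Bool) (out : List (Int × Int)) : Decidable (Spec_segments_from_adc_disabled prim_type adc_disabled out) := by unfold Spec_segments_from_adc_disabled; infer_instance

-- ===== CLAIM (what is proved, stated in full; the proofs are below) =====
def Claim_equal_segments_from_adc_disabled : Prop := ∀ (prim_type : Option Int) (adc_disabled : List Bool), Dom_segments_from_adc_disabled prim_type adc_disabled → Spec_segments_from_adc_disabled prim_type adc_disabled (segments_from_adc_disabled prim_type adc_disabled)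

-- ===== LEMMAS AND PROOFS =====

-- Consecutive pairing of a list of starts (with final endpoint `count`), keeping spans ≥ 3.
def pvChain (count : Int) : List Int → List (Int × Int)
  | [] => []
  | [s] => if count - s ≥ 3 then [(s, count)] else []
  | s :: t :: ts => (if t - s ≥ 3 then [(s, t)] else []) ++ pvChain count (t :: ts)

-- A's enumerate/index loop over `l` computes pvChain.
theorem pvChainA (count : Int) (l : List Int) (suffix : List Int) :
    ∀ (k : Nat), l.drop k = suffix → ∀ (acc : List (Int × Int)),
      (PySem.List.enumerate suffix (k : Int)).foldl
        (fun segs p =>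
          if (if p.1 + 1 < (l.length : Int) then PySem.List.pyGetD l (p.1 + 1) 0 else count) - p.2 ≥ 3
          then segs ++ [(p.2, (if p.1 + 1 < (l.length : Int) then PySem.List.pyGetD l (p.1 + 1) 0 else count))]
          else segs) acc
      = acc ++ pvChain count suffix := by
  induction suffix with
  | nil => intro k hk acc; simp [PySem.List.enumerate_nil, pvChain]
  | cons s rest ih =>
    intro k hk acc
    have hklen : k < l.length := by
      by_contra h
      simp [List.drop_eq_nil_of_le (Nat.le_of_not_lt h)] at hk
    have hdrop1 : l.drop (k + 1) = rest := by
      have := congrArg (List.drop 1) hk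
      simpa [List.drop_drop, Nat.add_comm] using this
    rw [PySem.List.enumerate_cons]
    simp only [List.foldl_cons]
    have ih' := ih (k + 1) hdrop1
    push_cast at ih'
    cases rest with
    | nil =>
      have hlen : l.length = k + 1 := by
        by_contra h
        have hlt : k + 1 < l.length := by omega
        have hne : l.drop (k + 1) ≠ [] := by
          intro hnil
          have := List.drop_eq_nil_iff.mp hnil
          omega
        exact hne hdrop1
      have hcond : ¬ ((k : Int) + 1 < (l.length : Int)) := by
        rw [hlen]; push_cast; omega
      simp only [hcond, if_false, PySem.List.enumerate_nil, List.foldl_nil, pvChain]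
      split_ifs <;> simp
    | cons t ts =>
      have hlt : k + 1 < l.length := by
        by_contra h
        have hnil : l.drop (k + 1) = [] := List.drop_eq_nil_iff.mpr (by omega)
        rw [hdrop1] at hnil; simp at hnil
      have hcond : ((k : Int) + 1 < (l.length : Int)) := by push_cast; omega
      have hget : PySem.List.pyGetD l ((k : Int) + 1) 0 = t := by
        rw [show ((k : Int) + 1) = ((k + 1 : Nat) : Int) by simp,
            PySem.List.pyGetD_natCast]
        rw [List.getD_eq_getElem?_getD]
        rw [List.getElem?_eq_getElem hlt]
        have h3 : l[k + 1]'hlt = t := by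
          have h4 : (l.drop (k + 1)).head (by simp [hdrop1]) = t := by simp [hdrop1]
          rwa [List.head_drop] at h4
        simp [h3]
      rw [ih']
      simp only [hcond, if_true, hget, pvChain]
      split_ifs <;> simp

-- B's fused scan (plus the final flush) computes pvChain of 0 :: the filtered boundaries.
theorem pvChainB (count : Int) (cond : Int → Bool) (R : List Int) :
    ∀ (cs : Int) (segs : List (Int × Int)),
      (let st := R.foldl
        (fun st index =>
          if cond index
          then (index, if index - st.1 ≥ 3 then st.2 ++ [(st.1, index)] else st.2)
          else st) (cs, segs)
       if count - st.1 ≥ 3 then st.2 ++ [(st.1, count)] else st.2)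
      = segs ++ pvChain count (cs :: R.filter cond) := by
  induction R with
  | nil => intro cs segs; simp [pvChain]; split_ifs <;> simp
  | cons r R' ih =>
    intro cs segs
    simp only [List.foldl_cons, List.filter_cons]
    by_cases hc : cond r
    · simp only [hc, if_true]
      rw [show (pvChain count (cs :: r :: R'.filter cond))
            = (if r - cs ≥ 3 then [(cs, r)] else []) ++ pvChain count (r :: R'.filter cond) from rfl]
      have := ih r (if r - cs ≥ 3 then segs ++ [(cs, r)] else segs)
      simp only at this ⊢
      rw [this]
      split_ifs <;> simp
    · simp only [hc, if_false, Bool.false_eq_true]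
      exact ih cs segs

-- A's start list is 0 followed by the (strictly increasing, all positive) boundary indices,
-- so sorted(set(…)) is the identity on it.
theorem pvStarts_eq (count : Int) (cond : Int → Bool) :
    PySem.List.sorted
      (PySem.Set.ofList ((PySem.List.pyRange 1 (count - 1) 1).foldl
        (fun acc index => if cond index then acc ++ [index] else acc) [0]))
      (fun x => x) false
    = 0 :: (PySem.List.pyRange 1 (count - 1) 1).filter cond := by
  rw [PySem.List.foldl_append_if_eq_filter, List.singleton_append]
  have hpw : ((0 : Int) :: (PySem.List.pyRange 1 (count - 1) 1).filter cond).Pairwise (· < ·) := by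
    constructor
    · intro x hx
      have hx' := List.mem_of_mem_filter hx
      have := PySem.List.mem_pyRange_one.mp hx'
      omega
    · exact List.Pairwise.filter _ (PySem.List.pairwise_lt_pyRange_one 1 (count - 1))
  rw [PySem.Set.ofList_eq_self_of_nodup _ (hpw.imp (fun h => ne_of_lt h))]
  exact PySem.List.sorted_eq_of_perm_of_pairwise_lt _ _ _ (List.Perm.refl _) hpw

-- ===== VERDICT (by name: the statement is the Claim_ definition above) =====
theorem segments_from_adc_disabled_spec : Claim_equal_segments_from_adc_disabled := by
  intro prim_type adc_disabled _
  unfold Spec_segments_from_adc_disabled segments_from_adc_disabled segments_from_adc_disabled_alt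
  by_cases hguard : prim_type ≠ some 4 ∨ (adc_disabled.length : Int) < 3
  · simp only [hguard, if_true]
  · simp only [hguard, if_false]
    set count : Int := (adc_disabled.length : Int) with hcount
    set cond : Int → Bool := fun index =>
      PySem.List.pyGetD adc_disabled index false && PySem.List.pyGetD adc_disabled (index + 1) false
      with hcond
    have hstarts := pvStarts_eq count cond
    simp only [hcond] at hstarts
    rw [hstarts]
    have hA := pvChainA count (0 :: (PySem.List.pyRange 1 (count - 1) 1).filter cond)
      (0 :: (PySem.List.pyRange 1 (count - 1) 1).filter cond) 0 rfl []
    simp only [Nat.cast_zero, hcond] at hA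
    rw [hA]
    have hB := pvChainB count cond (PySem.List.pyRange 1 (count - 1) 1) 0 []
    simp only [hcond] at hB
    rw [hB]
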